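-- pv_equiv track=rewrite | github.com/SPARSH511/Advent_of_Code_2025_Solutions | day10/aoc_day10_prob1.py | bfs
-- ===== SOURCE A (Python) =====
-- from collections import deque
--
-- def bfs(row):
--     target, buttons, _ = row
--     l = len(target)
--
--     q = deque([('.'*l, 0)])
--     vis = set()
--     while q:
--         state, clicks = q.popleft()
--
--         if state == target:
--             return clicks
--
--         for button in buttons:
--             curr_state = ''
--             for i in range(l):
--                 if i in button:
--                     if state[i] == '.':
--                         curr_state += '#'
--                     else:
--                         curr_state += '.'
--                 else:
--                     curr_state += state[i]
--
--             if curr_state not in vis: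
--                 q.append((curr_state, clicks + 1))
--                 vis.add(curr_state)
-- ===== SOURCE B (Python) =====
-- from collections import deque
--
-- def _button_mask(button, l):
--     m = 0
--     for i in range(l):
--         if i in button:
--             m |= 1 << i
--     return m
--
-- def bfs(row):
--     target, buttons, _ = row
--     l = len(target)
--     tmask = 0
--     for i, c in enumerate(target):
--         if c == '#':
--             tmask |= 1 << i
--         elif c != '.':
--             return None  # target is not a reachable pattern over '.'/'#'
--     masks = [_button_mask(b, l) for b in buttons]
--     q = deque([(0, 0)])
--     vis = set()
--     while q:
--         state, clicks = q.popleft()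
--         if state == tmask:
--             return clicks
--         for m in masks:
--             ns = state ^ m
--             if ns not in vis:
--                 q.append((ns, clicks + 1))
--                 vis.add(ns)
--     return None
-- ===== Notes on version B (the rewrite author's own statement) =====
-- stated objective: alternative
-- what changed: B precomputes each button's toggle set once as an integer bitmask and searches over integer states where a button press is a single XOR, eliminating A's per-expansion character-by-character string rebuild with an 'i in button' list scan per character; targets containing characters other than '.'/'#' are unreachable and rejected up front.
import Mathlib
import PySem

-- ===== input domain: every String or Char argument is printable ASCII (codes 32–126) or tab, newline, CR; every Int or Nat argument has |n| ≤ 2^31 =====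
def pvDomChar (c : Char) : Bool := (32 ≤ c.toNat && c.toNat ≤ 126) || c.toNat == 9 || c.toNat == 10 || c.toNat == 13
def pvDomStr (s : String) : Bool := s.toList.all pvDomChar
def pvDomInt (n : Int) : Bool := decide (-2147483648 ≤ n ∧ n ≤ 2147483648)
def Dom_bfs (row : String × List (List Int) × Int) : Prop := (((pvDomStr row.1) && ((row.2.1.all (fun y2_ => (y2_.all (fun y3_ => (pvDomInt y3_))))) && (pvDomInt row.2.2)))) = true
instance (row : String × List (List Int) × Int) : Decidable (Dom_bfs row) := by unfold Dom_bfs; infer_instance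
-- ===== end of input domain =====

-- B replaces A's per-expansion character-by-character string rebuild (with an `i in button` scan per
-- character) by integer bitmask states: each button's toggle mask is precomputed once and a transition
-- is a single XOR; targets containing characters other than '.'/'#' are unreachable and rejected up front.

-- ===== PORT A =====
-- inner loop 'for i in range(l): …' building curr_state; state[i] is always in range
-- (every state in the queue has length l), so List.getD is exact there
def bfsChildA (l : Nat) (state : List Char) (button : List Int) : List Char :=
  (List.range l).foldl
    (fun cs (i : Nat) =>
      if (i : Int) ∈ button then
        if state.getD i '.' = '.' then cs ++ ['#'] else cs ++ ['.']
      else cs ++ [state.getD i '.'])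
    []

-- the while-loop; fuel is decremented once per popleft and never runs out (see comment in bfs)
def bfsLoopA (target : List Char) (buttons : List (List Int)) (l : Nat) :
    Nat → List (List Char × Int) → PySem.Set (List Char) → Option Int
  | 0, _, _ => none
  | _ + 1, [], _ => none
  | fuel + 1, (state, clicks) :: q, vis =>
    if state = target then some clicks
    else
      let r := buttons.foldl
        (fun (acc : List (List Char × Int) × PySem.Set (List Char)) button =>
          let curr := bfsChildA l state button
          if curr ∈ acc.2 then acc
          else (acc.1 ++ [(curr, clicks + 1)], PySem.Set.add acc.2 curr))
        (q, vis)
      bfsLoopA target buttons l fuel r.1 r.2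

def bfs (row : String × List (List Int) × Int) : Option Int :=
  let target := row.1.toList
  let l := target.length
  -- Python's while-loop always terminates: each popleft consumes either the initial element or a
  -- pushed one, and pushes are bounded by |vis| ≤ 2^l (vis holds distinct length-l '.'/'#' strings),
  -- so pops ≤ 2^l + 1 < 2^l + 2 and the fueled loop is exact.
  bfsLoopA target row.2.1 l (2 ^ l + 2) [(List.replicate l '.', 0)] PySem.Set.empty

-- ===== PORT B =====
-- helper _button_mask(button, l): m |= 1 << i for each i in range(l) with i in button
def maskOfB (l : Nat) (button : List Int) : Nat :=
  (List.range l).foldl (fun m (i : Nat) => if (i : Int) ∈ button then m ||| (1 <<< i) else m) 0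

-- the 'for i, c in enumerate(target)' loop building tmask; none = early 'return None' on a bad char
def encodeTargetB : Nat → Nat → List Char → Option Nat
  | _, acc, [] => some acc
  | i, acc, c :: rest =>
    if c = '#' then encodeTargetB (i + 1) (acc ||| (1 <<< i)) rest
    else if c = '.' then encodeTargetB (i + 1) acc rest
    else none

def bfsLoopB (tmask : Nat) (masks : List Nat) :
    Nat → List (Nat × Int) → PySem.Set Nat → Option Int
  | 0, _, _ => none
  | _ + 1, [], _ => none
  | fuel + 1, (s, clicks) :: q, vis =>
    if s = tmask then some clicks
    else
      let r := masks.foldl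
        (fun (acc : List (Nat × Int) × PySem.Set Nat) m =>
          let ns := s ^^^ m
          if ns ∈ acc.2 then acc
          else (acc.1 ++ [(ns, clicks + 1)], PySem.Set.add acc.2 ns))
        (q, vis)
      bfsLoopB tmask masks fuel r.1 r.2

def bfs_alt (row : String × List (List Int) × Int) : Option Int :=
  let target := row.1.toList
  let l := target.length
  match encodeTargetB 0 0 target with
  | none => none
  | some tmask =>
      -- same termination bound as in bfs: pops ≤ 2^l + 1
      bfsLoopB tmask (row.2.1.map (maskOfB l)) (2 ^ l + 2) [(0, 0)] PySem.Set.empty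

-- ===== PRECONDITION & SPEC =====
def Spec_bfs (row : String × List (List Int) × Int) (out : Option Int) : Prop := out = bfs_alt row
instance (row : String × List (List Int) × Int) (out : Option Int) : Decidable (Spec_bfs row out) := by unfold Spec_bfs; infer_instance

-- ===== CLAIM (what is proved, stated in full; the proofs are below) =====
def Claim_equal_bfs : Prop := ∀ (row : String × List (List Int) × Int), Dom_bfs row → Spec_bfs row (bfs row)

-- ===== LEMMAS AND PROOFS =====

-- decMask l s = the length-l '.'/'#' string whose '#' positions are the set bits of s
def decMask (l : Nat) (s : Nat) : List Char :=
  (List.range l).map fun i => if s.testBit i then '#' else '.'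

theorem length_decMask (l s : Nat) : (decMask l s).length = l := by
  simp [decMask]

theorem getD_mapRange (l i : Nat) (h : i < l) (f : Nat → Char) :
    ((List.range l).map f).getD i '.' = f i := by
  rw [List.getD_eq_getElem _ _ (by simpa using h)]
  simp

theorem getD_decMask (l s i : Nat) (h : i < l) :
    (decMask l s).getD i '.' = if s.testBit i then '#' else '.' := by
  unfold decMask
  exact getD_mapRange l i h _

theorem decMask_zero (l : Nat) : decMask l 0 = List.replicate l '.' := by
  simp [decMask, Nat.zero_testBit, List.map_const']

theorem decMask_inj {l s t : Nat} (hs : s < 2 ^ l) (ht : t < 2 ^ l)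
    (h : decMask l s = decMask l t) : s = t := by
  apply Nat.eq_of_testBit_eq
  intro j
  by_cases hj : j < l
  · have h2 : (if s.testBit j then '#' else '.') = (if t.testBit j then '#' else '.') := by
      rw [← getD_decMask l s j hj, ← getD_decMask l t j hj, h]
    cases hbs : s.testBit j <;> cases hbt : t.testBit j <;> simp [hbs, hbt] at h2 ⊢
  · have hsl : s < 2 ^ j := lt_of_lt_of_le hs (Nat.pow_le_pow_right (by norm_num) (by omega))
    have htl : t < 2 ^ j := lt_of_lt_of_le ht (Nat.pow_le_pow_right (by norm_num) (by omega))
    rw [Nat.testBit_eq_false_of_lt hsl, Nat.testBit_eq_false_of_lt htl]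

theorem maskOfB_testBit (l : Nat) (button : List Int) (j : Nat) :
    (maskOfB l button).testBit j = (decide ((j : Int) ∈ button) && decide (j < l)) := by
  induction l with
  | zero => simp [maskOfB, Nat.zero_testBit]
  | succ n ih =>
    unfold maskOfB at ih ⊢
    rw [List.range_succ, List.foldl_append]
    simp only [List.foldl_cons, List.foldl_nil]
    by_cases hb : (n : Int) ∈ button
    · rw [if_pos hb, Nat.one_shiftLeft, Nat.testBit_or, ih, Nat.testBit_two_pow]
      rcases eq_or_ne j n with rfl | hne
      · simp [hb]
      · have : ¬ (n = j) := fun he => hne he.symm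
        simp only [this, decide_false, Bool.or_false]
        by_cases hjn : j < n
        · simp [hjn, Nat.lt_succ_of_lt hjn]
        · have : ¬ (j < n + 1) := by omega
          simp [hjn, this]
    · rw [if_neg hb, ih]
      rcases eq_or_ne j n with rfl | hne
      · simp [hb]
      · by_cases hjn : j < n
        · simp [hjn, Nat.lt_succ_of_lt hjn]
        · have : ¬ (j < n + 1) := by omega
          simp [hjn, this]

theorem maskOfB_lt (l : Nat) (button : List Int) : maskOfB l button < 2 ^ l := by
  induction l with
  | zero => norm_num [maskOfB]
  | succ n ih =>
    unfold maskOfB at ih ⊢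
    rw [List.range_succ, List.foldl_append]
    simp only [List.foldl_cons, List.foldl_nil]
    have hpow : (2 : Nat) ^ n < 2 ^ (n + 1) := by
      have := Nat.two_pow_pos n
      rw [pow_succ]; omega
    by_cases hb : (n : Int) ∈ button
    · rw [if_pos hb, Nat.one_shiftLeft]
      exact Nat.or_lt_two_pow (lt_trans ih hpow) hpow
    · rw [if_neg hb]; exact lt_trans ih hpow

-- A's curr_state construction as a map over range l
theorem childA_eq_map (l : Nat) (state : List Char) (button : List Int) :
    bfsChildA l state button = (List.range l).map (fun (i : Nat) =>
      if (i : Int) ∈ button then (if state.getD i '.' = '.' then '#' else '.')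
      else state.getD i '.') := by
  have key : ∀ (r : List Nat) (init : List Char),
      r.foldl (fun cs (i : Nat) =>
        if (i : Int) ∈ button then
          if state.getD i '.' = '.' then cs ++ ['#'] else cs ++ ['.']
        else cs ++ [state.getD i '.']) init
      = init ++ r.map (fun (i : Nat) =>
          if (i : Int) ∈ button then (if state.getD i '.' = '.' then '#' else '.')
          else state.getD i '.') := by
    intro r
    induction r with
    | nil => simp
    | cons a t iht =>
      intro init
      simp only [List.foldl_cons, List.map_cons]
      rw [iht]
      split_ifs <;> simp
  simpa [bfsChildA] using key (List.range l) []

-- pressing a button on a decoded state = XOR with the precomputed mask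
theorem childA_decMask (l : Nat) (s : Nat) (button : List Int) :
    bfsChildA l (decMask l s) button = decMask l (s ^^^ maskOfB l button) := by
  rw [childA_eq_map]
  unfold decMask
  apply List.map_congr_left
  intro i hi
  have hil : i < l := List.mem_range.mp hi
  rw [getD_mapRange l i hil, Nat.testBit_xor, maskOfB_testBit]
  by_cases hb : (i : Int) ∈ button <;> cases hbit : s.testBit i <;>
    simp [hb, hil]

theorem xor_mask_lt {l s : Nat} (hs : s < 2 ^ l) (button : List Int) :
    s ^^^ maskOfB l button < 2 ^ l :=
  Nat.xor_lt_two_pow hs (maskOfB_lt l button)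

-- characterisation of encodeTargetB on success
theorem encB_testBit : ∀ (cs : List Char) (i acc tm : Nat), acc < 2 ^ i →
    encodeTargetB i acc cs = some tm →
    (∀ j, tm.testBit j =
      (acc.testBit j || (decide (i ≤ j) && decide (j - i < cs.length) && decide (cs.getD (j - i) '.' = '#'))))
    ∧ tm < 2 ^ (i + cs.length) ∧ ∀ c ∈ cs, c = '#' ∨ c = '.' := by
  intro cs
  induction cs with
  | nil =>
    intro i acc tm hacc h
    simp only [encodeTargetB, Option.some.injEq] at h
    subst h
    exact ⟨fun j => by simp, by simpa using hacc, by simp⟩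
  | cons c rest ih =>
    intro i acc tm hacc h
    simp only [encodeTargetB] at h
    by_cases hc : c = '#'
    · rw [if_pos hc] at h
      have hpow : (2 : Nat) ^ i < 2 ^ (i + 1) := by
        have hp := Nat.two_pow_pos i; rw [pow_succ]; omega
      have hacc' : acc ||| 1 <<< i < 2 ^ (i + 1) := by
        rw [Nat.one_shiftLeft]; exact Nat.or_lt_two_pow (lt_trans hacc hpow) hpow
      obtain ⟨hbit, hlt, hval⟩ := ih (i + 1) _ tm hacc' h
      refine ⟨?_, by simpa [Nat.add_assoc, Nat.add_comm 1 rest.length] using hlt, ?_⟩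
      · intro j
        rw [hbit j, Nat.one_shiftLeft, Nat.testBit_or, Nat.testBit_two_pow]
        rcases Nat.lt_trichotomy j i with hj | rfl | hj
        · have h1 : ¬ (i = j) := by omega
          have h2 : ¬ (i ≤ j) := by omega
          have h3 : ¬ (i + 1 ≤ j) := by omega
          simp [h1, h2, h3]
        · have h1 : ¬ (j + 1 ≤ j) := by omega
          simp [hc, h1]
        · have h1 : ¬ (i = j) := by omega
          have h2 : i ≤ j := by omega
          have h3 : i + 1 ≤ j := by omega
          have h4 : j - i = (j - (i + 1)) + 1 := by omega
          rw [h4, List.getD_cons_succ]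
          simp [h1, h2, h3,
            show (j - (i + 1)) + 1 < rest.length + 1 ↔ (j - (i + 1)) < rest.length from by omega]
      · intro x hx
        rcases List.mem_cons.mp hx with hx | hx
        · exact Or.inl (hx.trans hc)
        · exact hval x hx
    · rw [if_neg hc] at h
      by_cases hd : c = '.'
      · rw [if_pos hd] at h
        have hacc' : acc < 2 ^ (i + 1) := by
          have hp := Nat.two_pow_pos i
          have hq : (2 : Nat) ^ (i + 1) = 2 ^ i * 2 := pow_succ 2 i
          omega
        obtain ⟨hbit, hlt, hval⟩ := ih (i + 1) acc tm hacc' h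
        refine ⟨?_, by simpa [Nat.add_assoc, Nat.add_comm 1 rest.length] using hlt, ?_⟩
        · intro j
          have hne : ('.' : Char) ≠ '#' := by decide
          rw [hbit j]
          rcases Nat.lt_trichotomy j i with hj | rfl | hj
          · have h2 : ¬ (i ≤ j) := by omega
            have h3 : ¬ (i + 1 ≤ j) := by omega
            simp [h2, h3]
          · have h1 : ¬ (j + 1 ≤ j) := by omega
            simp [hd, h1, hne]
          · have h2 : i ≤ j := by omega
            have h3 : i + 1 ≤ j := by omega
            have h4 : j - i = (j - (i + 1)) + 1 := by omega
            rw [h4, List.getD_cons_succ]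
            simp [h2, h3,
              show (j - (i + 1)) + 1 < rest.length + 1 ↔ (j - (i + 1)) < rest.length from by omega]
        · intro x hx
          rcases List.mem_cons.mp hx with hx | hx
          · exact Or.inr (hx.trans hd)
          · exact hval x hx
      · rw [if_neg hd] at h
        exact absurd h (by simp)

theorem encB_spec (cs : List Char) (tm : Nat) (h : encodeTargetB 0 0 cs = some tm) :
    tm < 2 ^ cs.length ∧ decMask cs.length tm = cs := by
  obtain ⟨hbit, hlt, hval⟩ := encB_testBit cs 0 0 tm (by norm_num) h
  refine ⟨by simpa using hlt, ?_⟩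
  apply List.ext_getElem (by simp [length_decMask])
  intro j h1 h2
  have hj : j < cs.length := h2
  have hb := hbit j
  simp only [Nat.zero_testBit, Bool.false_or, Nat.zero_le, decide_true, Nat.sub_zero,
    Bool.true_and] at hb
  have hbj : tm.testBit j = decide (cs[j] = '#') := by
    rw [hb]
    simp [hj]
  simp only [decMask, List.getElem_map, List.getElem_range]
  rcases hval cs[j] (List.getElem_mem hj) with hx | hx
  · simp [hbj, hx]
  · simp [hbj, hx]

theorem encB_none : ∀ (cs : List Char) (i acc : Nat), encodeTargetB i acc cs = none →
    ∃ j < cs.length, ¬ (cs.getD j '.' = '#') ∧ ¬ (cs.getD j '.' = '.') := by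
  intro cs
  induction cs with
  | nil => intro i acc h; simp [encodeTargetB] at h
  | cons c rest ih =>
    intro i acc h
    simp only [encodeTargetB] at h
    by_cases hc : c = '#'
    · rw [if_pos hc] at h
      obtain ⟨j, hj, h1, h2⟩ := ih (i + 1) _ h
      exact ⟨j + 1, by simpa using hj, by simpa using h1, by simpa using h2⟩
    · rw [if_neg hc] at h
      by_cases hd : c = '.'
      · rw [if_pos hd] at h
        obtain ⟨j, hj, h1, h2⟩ := ih (i + 1) _ h
        exact ⟨j + 1, by simpa using hj, by simpa using h1, by simpa using h2⟩
      · exact ⟨0, by simp, by simpa using hc, by simpa using hd⟩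

theorem decMask_ne (cs : List Char) (h : encodeTargetB 0 0 cs = none) (s : Nat) :
    decMask cs.length s ≠ cs := by
  obtain ⟨j, hj, h1, h2⟩ := encB_none cs 0 0 h
  intro he
  have := congrArg (fun xs => xs.getD j '.') he
  simp only at this
  rw [getD_decMask _ _ _ hj] at this
  cases hb : s.testBit j <;> rw [hb] at this <;> simp at this
  · exact h2 this.symm
  · exact h1 this.symm

-- the inner for-button fold, in lockstep
theorem fold_eq (l : Nat) (s : Nat) (clicks : Int) (hs : s < 2 ^ l) :
    ∀ (bs : List (List Int)) (q : List (Nat × Int)) (vis : List Nat),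
      (∀ p ∈ q, p.1 < 2 ^ l) → (∀ x ∈ vis, x < 2 ^ l) →
      (bs.foldl
        (fun (acc : List (List Char × Int) × PySem.Set (List Char)) button =>
          let curr := bfsChildA l (decMask l s) button
          if curr ∈ acc.2 then acc
          else (acc.1 ++ [(curr, clicks + 1)], PySem.Set.add acc.2 curr))
        (q.map (fun p => (decMask l p.1, p.2)), vis.map (decMask l)))
      = ((bs.foldl
          (fun (acc : List (Nat × Int) × PySem.Set Nat) button =>
            let ns := s ^^^ maskOfB l button
            if ns ∈ acc.2 then acc
            else (acc.1 ++ [(ns, clicks + 1)], PySem.Set.add acc.2 ns))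
          (q, vis)).1.map (fun p => (decMask l p.1, p.2)),
         (bs.foldl
          (fun (acc : List (Nat × Int) × PySem.Set Nat) button =>
            let ns := s ^^^ maskOfB l button
            if ns ∈ acc.2 then acc
            else (acc.1 ++ [(ns, clicks + 1)], PySem.Set.add acc.2 ns))
          (q, vis)).2.map (decMask l))
      ∧ (∀ p ∈ (bs.foldl
          (fun (acc : List (Nat × Int) × PySem.Set Nat) button =>
            let ns := s ^^^ maskOfB l button
            if ns ∈ acc.2 then acc
            else (acc.1 ++ [(ns, clicks + 1)], PySem.Set.add acc.2 ns))
          (q, vis)).1, p.1 < 2 ^ l)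
      ∧ (∀ x ∈ (bs.foldl
          (fun (acc : List (Nat × Int) × PySem.Set Nat) button =>
            let ns := s ^^^ maskOfB l button
            if ns ∈ acc.2 then acc
            else (acc.1 ++ [(ns, clicks + 1)], PySem.Set.add acc.2 ns))
          (q, vis)).2, x < 2 ^ l) := by
  intro bs
  induction bs with
  | nil => intro q vis hq hvis; exact ⟨rfl, hq, hvis⟩
  | cons b rest ih =>
    intro q vis hq hvis
    simp only [List.foldl_cons]
    have hns : s ^^^ maskOfB l b < 2 ^ l := xor_mask_lt hs b
    have hchild : bfsChildA l (decMask l s) b = decMask l (s ^^^ maskOfB l b) :=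
      childA_decMask l s b
    by_cases hmem : (s ^^^ maskOfB l b) ∈ vis
    · have hmemA : decMask l (s ^^^ maskOfB l b) ∈ vis.map (decMask l) :=
        List.mem_map_of_mem hmem
      simp only [hchild, hmemA, if_pos, hmem]
      exact ih q vis hq hvis
    · have hmemA : decMask l (s ^^^ maskOfB l b) ∉ vis.map (decMask l) := by
        intro hx
        obtain ⟨y, hy, hyeq⟩ := List.mem_map.mp hx
        exact hmem (decMask_inj (hvis y hy) hns hyeq ▸ hy)
      simp only [hchild, hmemA, if_neg, hmem, not_false_iff]
      rw [PySem.Set.add_of_not_mem hmemA, PySem.Set.add_of_not_mem hmem]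
      have hq' : ∀ p ∈ q ++ [(s ^^^ maskOfB l b, clicks + 1)], p.1 < 2 ^ l := by
        intro p hp
        rcases List.mem_append.mp hp with hp | hp
        · exact hq p hp
        · simp at hp; rw [hp]; exact hns
      have hvis' : ∀ x ∈ vis ++ [s ^^^ maskOfB l b], x < 2 ^ l := by
        intro x hx
        rcases List.mem_append.mp hx with hx | hx
        · exact hvis x hx
        · simp at hx; rw [hx]; exact hns
      have := ih (q ++ [(s ^^^ maskOfB l b, clicks + 1)]) (vis ++ [s ^^^ maskOfB l b]) hq' hvis'
      simpa using this

-- the two while-loops in lockstep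
theorem loop_eq (l : Nat) (buttons : List (List Int)) (tmask : Nat) (ht : tmask < 2 ^ l) :
    ∀ (fuel : Nat) (q : List (Nat × Int)) (vis : List Nat),
      (∀ p ∈ q, p.1 < 2 ^ l) → (∀ x ∈ vis, x < 2 ^ l) →
      bfsLoopA (decMask l tmask) buttons l fuel (q.map fun p => (decMask l p.1, p.2)) (vis.map (decMask l))
        = bfsLoopB tmask (buttons.map (maskOfB l)) fuel q vis := by
  intro fuel
  induction fuel with
  | zero => intro q vis _ _; cases q <;> rfl
  | succ n ih =>
    intro q vis hq hvis
    cases q with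
    | nil => rfl
    | cons p q' =>
      obtain ⟨s, c⟩ := p
      have hs : s < 2 ^ l := hq (s, c) List.mem_cons_self
      simp only [List.map_cons, bfsLoopA, bfsLoopB]
      by_cases he : s = tmask
      · subst he
        simp
      · have heA : decMask l s ≠ decMask l tmask := fun hx => he (decMask_inj hs ht hx)
        rw [if_neg heA, if_neg he]
        have hq' : ∀ p ∈ q', p.1 < 2 ^ l := fun p hp => hq p (List.mem_cons_of_mem _ hp)
        obtain ⟨hfold, hqb, hvb⟩ := fold_eq l s c hs buttons q' vis hq' hvis
        rw [List.foldl_map]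
        simp only at hfold ⊢
        rw [hfold]
        exact ih _ _ hqb hvb

-- when the target contains a character other than '.'/'#', A's search never matches:
-- every state in the queue is a decMask image
theorem loopA_fold_shape (l : Nat) (s : Nat) (clicks : Int) :
    ∀ (bs : List (List Int)) (acc : List (List Char × Int) × PySem.Set (List Char)),
      (∀ p ∈ acc.1, ∃ t, p.1 = decMask l t) →
      (∀ p ∈ (bs.foldl
        (fun (acc : List (List Char × Int) × PySem.Set (List Char)) button =>
          let curr := bfsChildA l (decMask l s) button
          if curr ∈ acc.2 then acc
          else (acc.1 ++ [(curr, clicks + 1)], PySem.Set.add acc.2 curr))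
        acc).1, ∃ t, p.1 = decMask l t) := by
  intro bs
  induction bs with
  | nil => intro acc h; exact h
  | cons b rest ih =>
    intro acc h
    simp only [List.foldl_cons]
    by_cases hmem : bfsChildA l (decMask l s) b ∈ acc.2
    · rw [if_pos hmem]; exact ih acc h
    · rw [if_neg hmem]
      apply ih
      intro p hp
      rcases List.mem_append.mp hp with hp | hp
      · exact h p hp
      · simp only [List.mem_singleton] at hp
        refine ⟨s ^^^ maskOfB l b, ?_⟩
        rw [hp]
        exact childA_decMask l s b

theorem loopA_none (l : Nat) (buttons : List (List Int)) (target : List Char)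
    (hne : ∀ s, decMask l s ≠ target) :
    ∀ (fuel : Nat) (q : List (List Char × Int)) (vis : PySem.Set (List Char)),
      (∀ p ∈ q, ∃ t, p.1 = decMask l t) →
      bfsLoopA target buttons l fuel q vis = none := by
  intro fuel
  induction fuel with
  | zero => intro q vis _; cases q <;> rfl
  | succ n ih =>
    intro q vis hq
    cases q with
    | nil => rfl
    | cons p q' =>
      obtain ⟨state, c⟩ := p
      obtain ⟨t, rfl⟩ := hq (state, c) List.mem_cons_self
      simp only [bfsLoopA]
      rw [if_neg (hne t)]
      apply ih
      exact loopA_fold_shape l t c buttons (q', vis)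
        (fun p hp => hq p (List.mem_cons_of_mem _ hp))

theorem bfs_eq_alt (row : String × List (List Int) × Int) : bfs row = bfs_alt row := by
  unfold bfs bfs_alt
  cases he : encodeTargetB 0 0 row.1.toList with
  | none =>
    simp only [he]
    apply loopA_none row.1.toList.length row.2.1 row.1.toList
      (fun s => decMask_ne row.1.toList he s)
    intro p hp
    simp only [List.mem_singleton] at hp
    refine ⟨0, ?_⟩
    rw [hp, decMask_zero]
  | some tm =>
    obtain ⟨hlt, hdec⟩ := encB_spec row.1.toList tm he
    simp only [he]
    rw [← hdec]
    simp only [length_decMask]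
    rw [show List.replicate row.1.toList.length '.' = decMask row.1.toList.length 0
      from (decMask_zero _).symm]
    have h := loop_eq row.1.toList.length row.2.1 tm hlt
      (2 ^ row.1.toList.length + 2) [(0, 0)] []
      (by intro p hp; simp only [List.mem_singleton] at hp; rw [hp]; exact Nat.two_pow_pos _)
      (by intro x hx; simp at hx)
    simpa [PySem.Set.empty] using h

-- ===== VERDICT (by name: the statement is the Claim_ definition above) =====
theorem bfs_spec : Claim_equal_bfs := by
  intro row _
  unfold Spec_bfs
  exact bfs_eq_alt row
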